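-- pv_equiv track=rewrite | github.com/JerryCheng-96/NW-Struct | Blosum.py | TracePath2Align
-- ===== SOURCE A (Python) =====
-- def TracePath2Align(revTracePath, seqStr_1, seqStr_2):
--     tracePath = revTracePath[::-1]
--     resStr_1 = ""
--     resStr_2 = ""
--     idx_1 = 0
--     idx_2 = 0
--
--     for i in tracePath:
--         if i == '.':
--             resStr_1 += seqStr_1[idx_1]
--             resStr_2 += seqStr_2[idx_2]
--             idx_1 += 1
--             idx_2 += 1
--         elif i == '-':
--             resStr_1 += seqStr_1[idx_1]
--             resStr_2 += '-'
--             idx_1 += 1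
--         elif i == '+':
--             resStr_2 += seqStr_2[idx_2]
--             resStr_1 += '-'
--             idx_2 += 1
--
--     return (resStr_1, resStr_2)
-- ===== SOURCE B (Python) =====
-- def TracePath2Align(revTracePath, seqStr_1, seqStr_2):
--     steps = [c for c in reversed(revTracePath) if c in '.-+']
--     it1 = iter(seqStr_1)
--     it2 = iter(seqStr_2)
--     resStr_1 = ''.join('-' if c == '+' else next(it1) for c in steps)
--     resStr_2 = ''.join('-' if c == '-' else next(it2) for c in steps)
--     return (resStr_1, resStr_2)
-- ===== Notes on version B (the rewrite author's own statement) =====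
-- stated objective: alternative
-- what changed: Instead of one interleaved loop maintaining (resStr_1, resStr_2, idx_1, idx_2), B filters the reversed trace to its meaningful steps once and builds each aligned string in its own independent comprehension pass that consumes the sequence through an iterator.
import Mathlib
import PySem

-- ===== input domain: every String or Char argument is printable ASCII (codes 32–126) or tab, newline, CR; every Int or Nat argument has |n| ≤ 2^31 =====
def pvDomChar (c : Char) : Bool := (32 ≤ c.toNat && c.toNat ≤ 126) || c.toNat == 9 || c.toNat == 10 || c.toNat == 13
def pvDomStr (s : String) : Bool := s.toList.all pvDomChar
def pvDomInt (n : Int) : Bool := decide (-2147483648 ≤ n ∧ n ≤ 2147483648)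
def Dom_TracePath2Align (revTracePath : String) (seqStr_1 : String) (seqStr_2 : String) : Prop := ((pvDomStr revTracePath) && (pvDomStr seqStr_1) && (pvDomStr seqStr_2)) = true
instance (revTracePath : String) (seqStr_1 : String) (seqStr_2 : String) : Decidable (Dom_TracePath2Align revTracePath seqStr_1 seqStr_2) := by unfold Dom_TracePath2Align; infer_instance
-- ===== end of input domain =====

-- ===== PORT A =====
-- B builds the two aligned strings by two independent map-passes over the once-filtered
-- trace (different decomposition of the same one-pass work); same cost, plainer per-pass state.
-- A-side loop: state (res1, res2, idx1, idx2), one step per trace char, branches in A's order.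
-- seqStr[idx] is PySem.List.pyGet?; the .getD ' ' default is unreachable under Pre_ (Python raises IndexError there).
def pvALoop (s1 s2 : List Char) : List Char → List Char → List Char → Nat → Nat → List Char × List Char
  | [], r1, r2, _, _ => (r1, r2)
  | c :: cs, r1, r2, i1, i2 =>
    if c = '.' then
      pvALoop s1 s2 cs (r1 ++ [(PySem.List.pyGet? s1 (i1 : Int)).getD ' ']) (r2 ++ [(PySem.List.pyGet? s2 (i2 : Int)).getD ' ']) (i1 + 1) (i2 + 1)
    else if c = '-' then
      pvALoop s1 s2 cs (r1 ++ [(PySem.List.pyGet? s1 (i1 : Int)).getD ' ']) (r2 ++ ['-']) (i1 + 1) i2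
    else if c = '+' then
      pvALoop s1 s2 cs (r1 ++ ['-']) (r2 ++ [(PySem.List.pyGet? s2 (i2 : Int)).getD ' ']) i1 (i2 + 1)
    else
      pvALoop s1 s2 cs r1 r2 i1 i2

def TracePath2Align (revTracePath : String) (seqStr_1 : String) (seqStr_2 : String) : String × String :=
  -- revTracePath[::-1]; step -1 never yields none, so the .getD [] default is unreachable
  let tracePath := (PySem.List.slice? revTracePath.toList none none (-1)).getD []
  let r := pvALoop seqStr_1.toList seqStr_2.toList tracePath [] [] 0 0
  (String.ofList r.1, String.ofList r.2)

-- ===== PORT B =====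
-- one comprehension pass of Source B: '-' where the gap char matches, else the next char of the iterator
-- (next(it) on an exhausted iterator raises in Python; the ' ' default is unreachable under Pre_)
def pvBMap (gapChar : Char) : List Char → List Char → List Char
  | [], _ => []
  | c :: cs, rem =>
    if c = gapChar then '-' :: pvBMap gapChar cs rem
    else rem.headD ' ' :: pvBMap gapChar cs rem.tail

def TracePath2Align_alt (revTracePath : String) (seqStr_1 : String) (seqStr_2 : String) : String × String :=
  let steps := revTracePath.toList.reverse.filter (fun c => c = '.' ∨ c = '-' ∨ c = '+')
  (String.ofList (pvBMap '+' steps seqStr_1.toList), String.ofList (pvBMap '-' steps seqStr_2.toList))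

-- ===== PRECONDITION & SPEC =====
-- Pre_ excludes exactly the inputs where Python A raises IndexError: the trace demands more
-- characters of seqStr_1 (steps '.' and '-') or of seqStr_2 (steps '.' and '+') than the string has.
def Pre_TracePath2Align (revTracePath : String) (seqStr_1 : String) (seqStr_2 : String) : Prop :=
  revTracePath.toList.count '.' + revTracePath.toList.count '-' ≤ seqStr_1.toList.length ∧
  revTracePath.toList.count '.' + revTracePath.toList.count '+' ≤ seqStr_2.toList.length
instance (revTracePath : String) (seqStr_1 : String) (seqStr_2 : String) : Decidable (Pre_TracePath2Align revTracePath seqStr_1 seqStr_2) := by unfold Pre_TracePath2Align; infer_instance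

def pvWitness_TracePath2Align : String × String × String := (".+-", "ab", "cd")

def Spec_TracePath2Align (revTracePath : String) (seqStr_1 : String) (seqStr_2 : String) (out : String × String) : Prop := out = TracePath2Align_alt revTracePath seqStr_1 seqStr_2
instance (revTracePath : String) (seqStr_1 : String) (seqStr_2 : String) (out : String × String) : Decidable (Spec_TracePath2Align revTracePath seqStr_1 seqStr_2 out) := by unfold Spec_TracePath2Align; infer_instance

-- ===== CLAIM (what is proved, stated in full; the proofs are below) =====
def Claim_equal_TracePath2Align : Prop := ∀ (revTracePath : String) (seqStr_1 : String) (seqStr_2 : String), Dom_TracePath2Align revTracePath seqStr_1 seqStr_2 → Pre_TracePath2Align revTracePath seqStr_1 seqStr_2 → Spec_TracePath2Align revTracePath seqStr_1 seqStr_2 (TracePath2Align revTracePath seqStr_1 seqStr_2)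

-- ===== LEMMAS AND PROOFS =====
-- A's interleaved loop splits into the two independent B-passes over the filtered trace,
-- with the index idx replaced by the dropped suffix of the sequence.  Holds for every state,
-- so the claim follows without using Pre_ (the two ports share the same out-of-range default).
lemma pvALoop_eq (s1 s2 : List Char) (tp : List Char) :
    ∀ (r1 r2 : List Char) (i1 i2 : Nat),
      pvALoop s1 s2 tp r1 r2 i1 i2 =
        (r1 ++ pvBMap '+' (tp.filter (fun c => c = '.' ∨ c = '-' ∨ c = '+')) (s1.drop i1),
         r2 ++ pvBMap '-' (tp.filter (fun c => c = '.' ∨ c = '-' ∨ c = '+')) (s2.drop i2)) := by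
  induction tp with
  | nil => intro r1 r2 i1 i2; simp [pvALoop, pvBMap]
  | cons c cs ih =>
    intro r1 r2 i1 i2
    by_cases h1 : c = '.'
    · subst h1
      simp [pvALoop, ih, pvBMap, ← List.tail_drop]
    · by_cases h2 : c = '-'
      · subst h2
        simp [pvALoop, ih, pvBMap, ← List.tail_drop]
      · by_cases h3 : c = '+'
        · subst h3
          simp [pvALoop, ih, pvBMap, ← List.tail_drop]
        · simp [pvALoop, ih, h1, h2, h3]

-- ===== VERDICT (by name: the statement is the Claim_ definition above) =====
theorem TracePath2Align_spec : Claim_equal_TracePath2Align := by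
  intro rev s1 s2 _ _
  unfold Spec_TracePath2Align TracePath2Align TracePath2Align_alt
  rw [PySem.List.slice?_none_none_neg_one]
  have h := pvALoop_eq s1.toList s2.toList rev.toList.reverse [] [] 0 0
  simp only [List.drop_zero, List.nil_append] at h
  simp [h]
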